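-- pv_equiv track=rewrite | github.com/Aizzler6s/crew-allowance-app | app.py | build_rotations
-- ===== SOURCE A (Python) =====
-- HOME_BASE = "CDG"
--
-- def build_rotations(flights):
--     rotations = []
--     current = []
--
--     for f in flights:
--         current.append(f)
--
--         if f["arr"] == HOME_BASE:
--             rotations.append(current)
--             current = []
--
--     if current:
--         rotations.append(current)
--
--     return rotations
-- ===== SOURCE B (Python) =====
-- HOME_BASE = "CDG"
--
-- def build_rotations(flights):
--     # Recursive decomposition: split off the first rotation (up to and
--     # including the first arrival at home base), recurse on the rest.
--     if not flights:
--         return []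
--     i = next((k for k, f in enumerate(flights) if f["arr"] == HOME_BASE), None)
--     if i is None:
--         return [flights]
--     return [flights[:i + 1]] + build_rotations(flights[i + 1:])
-- ===== Notes on version B (the rewrite author's own statement) =====
-- stated objective: alternative
-- what changed: Replaced the single accumulator loop (growing 'current', flushing it at each home-base arrival, flushing the leftover after the loop) by a recursive decomposition: find the first home-base arrival, slice off that rotation, and recurse on the remainder.
import Mathlib
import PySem

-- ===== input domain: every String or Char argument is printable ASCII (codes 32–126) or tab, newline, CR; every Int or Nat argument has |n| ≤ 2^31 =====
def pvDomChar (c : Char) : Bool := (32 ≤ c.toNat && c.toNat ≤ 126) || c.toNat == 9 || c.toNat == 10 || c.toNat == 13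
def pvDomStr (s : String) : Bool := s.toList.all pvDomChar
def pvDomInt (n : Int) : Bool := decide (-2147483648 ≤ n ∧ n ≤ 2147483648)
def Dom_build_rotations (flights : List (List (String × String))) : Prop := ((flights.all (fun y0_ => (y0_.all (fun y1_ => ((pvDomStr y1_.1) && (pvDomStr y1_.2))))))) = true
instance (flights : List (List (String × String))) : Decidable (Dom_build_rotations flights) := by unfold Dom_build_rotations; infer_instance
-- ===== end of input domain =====

-- B replaces A's accumulator loop by a recursive decomposition (slice off the first rotation, recurse); equivalence of the return values is proved on inputs whose dicts all carry an "arr" key.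

-- f["arr"] == HOME_BASE; the getD "" default is never consulted under Pre_ (key present)
def pvHome (f : List (String × String)) : Bool :=
  ((PySem.Dict.ofList f).get? "arr").getD "" == "CDG"

-- ===== PORT A =====
-- the for-loop of A, state = (rotations, current); after the loop: 'if current: rotations.append(current)'
def pvLoopA (fs : List (List (String × String)))
    (rots : List (List (List (String × String)))) (cur : List (List (String × String))) :
    List (List (List (String × String))) :=
  match fs with
  | [] => if cur.isEmpty then rots else rots ++ [cur]
  | f :: rest =>
      let cur' := cur ++ [f]
      if pvHome f then pvLoopA rest (rots ++ [cur']) [] else pvLoopA rest rots cur'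

def build_rotations (flights : List (List (String × String))) : List (List (List (String × String))) :=
  pvLoopA flights [] []

-- ===== PORT B =====
-- Source B's generator scan: next((k for k, f in enumerate(fs) if f["arr"] == HOME_BASE), None)
def pvFindHome (fs : List (List (String × String))) (k : Nat) : Option Nat :=
  match fs with
  | [] => none
  | f :: rest => if pvHome f then some k else pvFindHome rest (k + 1)

-- flights[:i+1] / flights[i+1:] with i+1 ≥ 0 are exactly take/drop
def build_rotations_alt (flights : List (List (String × String))) : List (List (List (String × String))) :=
  if h : flights.isEmpty then []
  else
    match pvFindHome flights 0 with
    | none => [flights]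
    | some i => flights.take (i + 1) :: build_rotations_alt (flights.drop (i + 1))
termination_by flights.length
decreasing_by
  simp only [List.length_drop]
  have : flights ≠ [] := by simpa [List.isEmpty_iff] using h
  have := List.length_pos_of_ne_nil this
  omega

-- ===== PRECONDITION & SPEC =====
-- Pre_ excludes flights dicts without an "arr" key, on which Python A raises KeyError.
def Pre_build_rotations (flights : List (List (String × String))) : Prop :=
  ∀ f ∈ flights, ((PySem.Dict.ofList f).get? "arr").isSome = true
instance (flights : List (List (String × String))) : Decidable (Pre_build_rotations flights) := by
  unfold Pre_build_rotations; infer_instance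

def pvWitness_build_rotations : (List (List (String × String))) :=
  [[("arr", "CDG"), ("dep", "NCE")], [("arr", "NCE"), ("dep", "CDG")]]

def Spec_build_rotations (flights : List (List (String × String))) (out : List (List (List (String × String)))) : Prop := out = build_rotations_alt flights
instance (flights : List (List (String × String))) (out : List (List (List (String × String)))) : Decidable (Spec_build_rotations flights out) := by unfold Spec_build_rotations; infer_instance

-- ===== CLAIM (what is proved, stated in full; the proofs are below) =====
def Claim_equal_build_rotations : Prop := ∀ (flights : List (List (String × String))), Dom_build_rotations flights → Pre_build_rotations flights → Spec_build_rotations flights (build_rotations flights)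

-- ===== LEMMAS AND PROOFS =====

theorem pvLoopA_acc (fs : List (List (String × String)))
    (rots : List (List (List (String × String)))) (cur : List (List (String × String))) :
    pvLoopA fs rots cur = rots ++ pvLoopA fs [] cur := by
  induction fs generalizing rots cur with
  | nil => simp [pvLoopA]; split <;> simp
  | cons f rest ih =>
      simp only [pvLoopA]
      by_cases h : pvHome f <;> simp [h, ih (rots ++ [cur ++ [f]]), ih [cur ++ [f]], ih rots]

theorem pvFindHome_none (fs : List (List (String × String))) (k : Nat)
    (h : ∀ f ∈ fs, pvHome f = false) : pvFindHome fs k = none := by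
  induction fs generalizing k with
  | nil => rfl
  | cons f rest ih =>
      simp only [pvFindHome, h f (by simp)]
      exact ih (k + 1) (fun g hg => h g (by simp [hg]))

theorem pvFindHome_append (pre fs : List (List (String × String))) (k : Nat)
    (h : ∀ f ∈ pre, pvHome f = false) :
    pvFindHome (pre ++ fs) k = pvFindHome fs (k + pre.length) := by
  induction pre generalizing k with
  | nil => simp
  | cons p rest ih =>
      simp only [List.cons_append, pvFindHome, h p (by simp)]
      rw [ih (k + 1) (fun g hg => h g (by simp [hg])), List.length_cons,
        show k + 1 + rest.length = k + (rest.length + 1) from by omega]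
      simp

theorem pvLoopA_alt (fs cur : List (List (String × String)))
    (h : ∀ f ∈ cur, pvHome f = false) :
    pvLoopA fs [] cur = build_rotations_alt (cur ++ fs) := by
  induction fs generalizing cur with
  | nil =>
      rw [build_rotations_alt]
      simp only [List.append_nil, pvLoopA]
      by_cases hc : cur.isEmpty
      · simp [hc]
      · simp [hc, pvFindHome_none cur 0 h]
  | cons f rest ih =>
      have hne : (cur ++ f :: rest).isEmpty = false := by simp
      by_cases hf : pvHome f
      · rw [build_rotations_alt]
        have hfind : pvFindHome (cur ++ f :: rest) 0 = some cur.length := by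
          rw [pvFindHome_append cur (f :: rest) 0 h]
          simp [pvFindHome, hf]
        simp only [hne, hfind, Bool.false_eq_true, reduceDIte]
        have htake : (cur ++ f :: rest).take (cur.length + 1) = cur ++ [f] := by
          rw [show cur.length + 1 = cur.length + (0 + 1) by omega, List.take_append]
          simp
        have hdrop : (cur ++ f :: rest).drop (cur.length + 1) = rest := by
          rw [show cur.length + 1 = cur.length + (0 + 1) by omega, List.drop_append]
          simp
        rw [htake, hdrop]
        simp only [pvLoopA, hf, if_true]
        rw [pvLoopA_acc]
        rw [ih [] (by simp)]
        simp
      · simp only [pvLoopA, hf, Bool.false_eq_true, if_false]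
        rw [ih (cur ++ [f]) ?_]
        · simp
        · intro g hg
          rcases List.mem_append.mp hg with hg | hg
          · exact h g hg
          · simp at hg; subst hg; simpa using hf

-- ===== VERDICT (by name: the statement is the Claim_ definition above) =====
theorem build_rotations_spec : Claim_equal_build_rotations := by
  intro flights _ _
  show build_rotations flights = build_rotations_alt flights
  have := pvLoopA_alt flights [] (by simp)
  simpa [build_rotations] using this
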